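-- pv_equiv track=rewrite | github.com/jeffersonsouza/computer-engineering-degree | fundamentos-python/TP1/04-fatorial-while.py | calcula_fatorial
-- ===== SOURCE A (Python) =====
-- def calcula_fatorial(numero):
--     numero = int(numero)
--     resultado = 1
--     calc = ''
--     while numero >= 1:
--         calc += f"{numero} {'x' if numero > 1 else '='} "
--         resultado *= numero
--         numero -= 1
--
--     return calc + str(resultado)
-- ===== SOURCE B (Python) =====
-- def calcula_fatorial(numero):
--     numero = int(numero)
--     termos = list(range(numero, 0, -1))
--     resultado = 1
--     for t in termos:
--         resultado *= t
--     if not termos: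
--         return str(resultado)
--     return ' x '.join(map(str, termos)) + ' = ' + str(resultado)
-- ===== Notes on version B (the rewrite author's own statement) =====
-- stated objective: simpler
-- what changed: Replaces A's single interleaved while-loop with per-step 'x'/'=' branching by materializing the descending term list once, folding it into the product, and building the display with one ' x '.join plus a single ' = ' appended only when the list is non-empty.
import Mathlib
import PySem

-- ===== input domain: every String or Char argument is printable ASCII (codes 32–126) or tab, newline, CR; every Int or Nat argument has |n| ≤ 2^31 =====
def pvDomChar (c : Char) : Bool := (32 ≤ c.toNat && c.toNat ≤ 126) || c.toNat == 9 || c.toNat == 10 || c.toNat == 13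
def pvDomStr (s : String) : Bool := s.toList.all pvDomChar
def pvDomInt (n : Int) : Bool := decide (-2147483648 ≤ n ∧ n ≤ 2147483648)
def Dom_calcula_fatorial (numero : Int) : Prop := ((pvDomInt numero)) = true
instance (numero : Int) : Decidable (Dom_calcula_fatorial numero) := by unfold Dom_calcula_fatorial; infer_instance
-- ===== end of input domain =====

-- B replaces A's interleaved while-loop (per-step 'x'/'=' branch) by a recursive factorial
-- plus a ' x '-join over a descending range, appending ' = ' once; objective: simpler.

-- ===== PORT A =====
-- the while-loop of A, with state (numero, resultado, calc)
def pvLoopA (numero resultado : Int) (acc : String) : String :=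
  if numero ≥ 1 then
    pvLoopA (numero - 1) (resultado * numero)
      (acc ++ PySem.Int.toStr numero ++ " " ++ (if numero > 1 then "x" else "=") ++ " ")
  else
    acc ++ PySem.Int.toStr resultado
termination_by numero.toNat
decreasing_by omega

def calcula_fatorial (numero : Int) : String := pvLoopA numero 1 ""

-- ===== PORT B =====
def calcula_fatorial_alt (numero : Int) : String :=
  let termos := PySem.List.pyRange numero 0 (-1)
  let resultado := termos.foldl (· * ·) 1
  if termos.isEmpty then
    PySem.Int.toStr resultado
  else
    PySem.Str.join " x " (termos.map PySem.Int.toStr) ++ " = " ++ PySem.Int.toStr resultado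

-- ===== PRECONDITION & SPEC =====
def Spec_calcula_fatorial (numero : Int) (out : String) : Prop := out = calcula_fatorial_alt numero
instance (numero : Int) (out : String) : Decidable (Spec_calcula_fatorial numero out) := by unfold Spec_calcula_fatorial; infer_instance

-- ===== CLAIM (what is proved, stated in full; the proofs are below) =====
def Claim_equal_calcula_fatorial : Prop := ∀ (numero : Int), Dom_calcula_fatorial numero → Spec_calcula_fatorial numero (calcula_fatorial numero)

-- ===== LEMMAS AND PROOFS =====

theorem pvStr_join_cons_cons (sep p q : String) (rest : List String) :
    PySem.Str.join sep (p :: q :: rest) = p ++ sep ++ PySem.Str.join sep (q :: rest) := by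
  apply String.ext
  simp [PySem.Str.toList_join, PySem.Chars.join_cons_cons]

-- invariant of A's loop: for n ≥ 1 it appends B's display and the fold of the running product
theorem pvLoopA_inv : ∀ n : Int, 1 ≤ n → ∀ (r : Int) (c : String),
    pvLoopA n r c =
      c ++ PySem.Str.join " x " ((PySem.List.pyRange n 0 (-1)).map PySem.Int.toStr)
        ++ " = " ++ PySem.Int.toStr ((PySem.List.pyRange n 0 (-1)).foldl (· * ·) r) := by
  intro n hn
  induction n, hn using Int.le_induction with
  | base =>
      intro r c
      rw [pvLoopA]
      simp only [show (1:Int) ≥ 1 by omega, if_pos]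
      rw [pvLoopA]
      simp only [show ¬ ((1:Int) - 1 ≥ 1) by omega, if_neg, not_false_iff]
      rw [PySem.List.pyRange_neg_one_cons (by omega : (0:Int) < 1),
          PySem.List.pyRange_neg_one_eq_nil (by omega : (1:Int) - 1 ≤ 0)]
      simp only [List.map_cons, List.map_nil, PySem.Str.join, List.foldl_cons, List.foldl_nil]
      rw [if_neg (by omega : ¬ ((1:Int) > 1))]
      apply String.ext
      simp
  | succ n hn ih =>
      intro r c
      rw [pvLoopA]
      simp only [show n + 1 ≥ 1 by omega, if_pos]
      rw [if_pos (by omega : n + 1 > 1)]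
      rw [show n + 1 - 1 = n by ring, ih]
      rw [PySem.List.pyRange_neg_one_cons (by omega : (0:Int) < n + 1),
          show n + 1 - 1 = n by ring]
      rw [PySem.List.pyRange_neg_one_cons (by omega : (0:Int) < n)]
      simp only [List.map_cons, List.foldl_cons]
      rw [pvStr_join_cons_cons]
      apply String.ext
      simp [String.toList_append]

theorem calcula_fatorial_spec : Claim_equal_calcula_fatorial := by
  intro numero _
  unfold Spec_calcula_fatorial calcula_fatorial calcula_fatorial_alt
  by_cases h : numero < 1
  · rw [pvLoopA]
    rw [if_neg (by omega : ¬ numero ≥ 1)]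
    rw [PySem.List.pyRange_neg_one_eq_nil (by omega : numero ≤ 0)]
    simp
  · rw [pvLoopA_inv numero (by omega) 1 ""]
    have hne : PySem.List.pyRange numero 0 (-1) = numero :: PySem.List.pyRange (numero - 1) 0 (-1) :=
      PySem.List.pyRange_neg_one_cons (by omega : (0:Int) < numero)
    simp only [hne, List.isEmpty_cons, if_neg Bool.false_ne_true]
    apply String.ext
    simp [String.toList_append]
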